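-- pv_equiv track=rewrite | github.com/Adam-Jimenez/binarysearch-editorials | Selling Products.py | solve
-- ===== SOURCE A (Python) =====
-- from collections import Counter
--
-- def solve(items, n):
--     c=Counter(items)
--     ans=len(c)
--     freq=sorted(c.values())
--     i=0
--     while i<len(freq):
--         if freq[i]<=n:
--             n-=freq[i]
--             ans-=1
--         else:
--             return ans
--         i+=1
--     return 0
-- ===== SOURCE B (Python) =====
-- from collections import Counter
--
-- def solve(items, n):
--     c = Counter(items)
--     freq = sorted(c.values())
--     # prefix-sum table: prefix[i] = cost of removing the i+1 smallest groups
--     prefix = []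
--     s = 0
--     for f in freq:
--         s += f
--         prefix.append(s)
--     # hand-written bisect_right(prefix, n) (stdlib bisect not imported by the original module)
--     lo, hi = 0, len(prefix)
--     while lo < hi:
--         mid = (lo + hi) // 2
--         if n < prefix[mid]:
--             hi = mid
--         else:
--             lo = mid + 1
--     return len(c) - lo
-- ===== Notes on version B (the rewrite author's own statement) =====
-- stated objective: alternative
-- what changed: Replaces the decrement-per-group greedy while loop (mutating n and ans) with a prefix-sum table over the sorted frequencies and one binary search (bisect_right) for the number of affordable groups.
import Mathlib
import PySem

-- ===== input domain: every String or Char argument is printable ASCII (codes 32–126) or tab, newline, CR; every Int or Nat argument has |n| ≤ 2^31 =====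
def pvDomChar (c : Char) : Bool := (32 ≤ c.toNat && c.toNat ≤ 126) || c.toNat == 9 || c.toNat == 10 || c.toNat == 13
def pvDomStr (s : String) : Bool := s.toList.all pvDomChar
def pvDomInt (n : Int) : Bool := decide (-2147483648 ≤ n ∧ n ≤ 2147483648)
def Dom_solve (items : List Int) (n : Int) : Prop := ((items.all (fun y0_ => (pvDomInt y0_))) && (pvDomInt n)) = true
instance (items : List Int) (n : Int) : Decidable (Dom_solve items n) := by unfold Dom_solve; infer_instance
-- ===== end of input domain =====

-- B replaces A's decrement-per-group greedy while loop by a prefix-sum table over the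
-- sorted frequencies plus one binary search (bisect_right); a different algorithm of
-- similar cost (objective: alternative).

-- ===== PORT A =====
-- A's `while i < len(freq)` walks freq left to right carrying n and ans: the obvious
-- structural recursion over the remaining suffix of freq with the same state.
def solveLoop : List Int → Int → Int → Int
  | [], _, _ => 0
  | f :: rest, n, ans => if f ≤ n then solveLoop rest (n - f) (ans - 1) else ans

def solve (items : List Int) (n : Int) : Int :=
  let c := PySem.Dict.counter items
  let ans : Int := (c.size : Int)
  let freq := PySem.List.sorted c.values (fun x => x)
  solveLoop freq n ans

-- ===== PORT B =====
-- `for f in freq: s += f; prefix.append(s)`: append-at-end becomes cons at the recursion point.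
def buildPrefix (s : Int) : List Int → List Int
  | [] => []
  | f :: rest => (s + f) :: buildPrefix (s + f) rest

def solve_alt (items : List Int) (n : Int) : Int :=
  let c := PySem.Dict.counter items
  let freq := PySem.List.sorted c.values (fun x => x)
  let pre := buildPrefix 0 freq
  -- Source B's hand-written lo/hi loop is exactly bisect_right; PySem.List.bisectRight is that loop
  let lo := PySem.List.bisectRight pre n
  (c.size : Int) - (lo : Int)

-- ===== PRECONDITION & SPEC =====
def Spec_solve (items : List Int) (n : Int) (out : Int) : Prop := out = solve_alt items n
instance (items : List Int) (n : Int) (out : Int) : Decidable (Spec_solve items n out) := by unfold Spec_solve; infer_instance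

-- ===== CLAIM (what is proved, stated in full; the proofs are below) =====
def Claim_equal_solve : Prop := ∀ (items : List Int) (n : Int), Dom_solve items n → Spec_solve items n (solve items n)

-- ===== LEMMAS AND PROOFS =====

lemma length_buildPrefix (l : List Int) : ∀ s : Int, (buildPrefix s l).length = l.length := by
  induction l with
  | nil => intro s; simp [buildPrefix]
  | cons f r ih => intro s; simp [buildPrefix, ih]

lemma lt_of_mem_buildPrefix (l : List Int) :
    ∀ s p : Int, (∀ f ∈ l, 1 ≤ f) → p ∈ buildPrefix s l → s < p := by
  induction l with
  | nil => intro s p _ hp; simp [buildPrefix] at hp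
  | cons f r ih =>
    intro s p hpos hp
    have hf : 1 ≤ f := hpos f (by simp)
    simp only [buildPrefix, List.mem_cons] at hp
    rcases hp with h | h
    · omega
    · have := ih (s + f) p (fun g hg => hpos g (by simp [hg])) h
      omega

lemma pairwise_buildPrefix (l : List Int) :
    ∀ s : Int, (∀ f ∈ l, 1 ≤ f) → (buildPrefix s l).Pairwise (· < ·) := by
  induction l with
  | nil => intro s _; simp [buildPrefix]
  | cons f r ih =>
    intro s hpos
    have hf : 1 ≤ f := hpos f (by simp)
    have hrest : ∀ g ∈ r, 1 ≤ g := fun g hg => hpos g (by simp [hg])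
    simp only [buildPrefix, List.pairwise_cons]
    refine ⟨fun p hp => ?_, ih (s + f) hrest⟩
    exact lt_of_mem_buildPrefix r (s + f) p hrest hp

-- elements strictly before the takeWhile cut satisfy the predicate
lemma takeWhile_getElem_le (a : List Int) (x : Int) :
    ∀ j (hj : j < a.length), j < (a.takeWhile (fun p => decide (p ≤ x))).length → a[j] ≤ x := by
  induction a with
  | nil => intro j hj; simp at hj
  | cons f r ih =>
    intro j hj hlt
    by_cases hfx : f ≤ x
    · simp [hfx] at hlt
      cases j with
      | zero => simpa using hfx
      | succ j' =>
        simp only [List.getElem_cons_succ]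
        exact ih j' (by simpa using hj) (by omega)
    · simp [hfx] at hlt
  
-- the element at the takeWhile cut fails the predicate
lemma takeWhile_getElem_boundary (a : List Int) (x : Int) :
    ∀ (h : (a.takeWhile (fun p => decide (p ≤ x))).length < a.length),
      x < a[(a.takeWhile (fun p => decide (p ≤ x))).length] := by
  induction a with
  | nil => intro h; simp at h
  | cons f r ih =>
    intro h
    by_cases hfx : f ≤ x
    · simp only [List.takeWhile_cons, hfx, decide_true]
      exact ih (by simpa [List.takeWhile_cons, hfx] using h)
    · simp [hfx]; omega

-- from the cut on, every element exceeds x (needs strict sortedness)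
lemma takeWhile_getElem_gt (a : List Int) (x : Int) (hsort : a.Pairwise (· < ·)) :
    ∀ j (hj : j < a.length), (a.takeWhile (fun p => decide (p ≤ x))).length ≤ j → x < a[j] := by
  intro j hj hge
  set t := (a.takeWhile (fun p => decide (p ≤ x))).length with ht
  have htlen : t < a.length := lt_of_le_of_lt hge hj
  have hbd : x < a[t] := takeWhile_getElem_boundary a x htlen
  rcases Nat.eq_or_lt_of_le hge with h | h
  · subst h; exact hbd
  · have := (List.pairwise_iff_getElem.mp hsort) t j htlen hj h
    omega

-- the characterization of bisectRight_spec has a unique solution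
lemma char_unique (a : List Int) (x : Int) (t k : Nat)
    (ht1 : t ≤ a.length)
    (ht2 : ∀ j (hj : j < a.length), j < t → a[j] ≤ x)
    (ht3 : ∀ j (hj : j < a.length), t ≤ j → x < a[j])
    (hk1 : k ≤ a.length)
    (hk2 : ∀ j (hj : j < a.length), j < k → a[j] ≤ x)
    (hk3 : ∀ j (hj : j < a.length), k ≤ j → x < a[j]) : t = k := by
  rcases Nat.lt_trichotomy t k with h | h | h
  · have htl : t < a.length := lt_of_lt_of_le h hk1
    have h1 := hk2 t htl h
    have h2 := ht3 t htl (le_refl t)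
    omega
  · exact h
  · have hkl : k < a.length := lt_of_lt_of_le h ht1
    have h1 := ht2 k hkl h
    have h2 := hk3 k hkl (le_refl k)
    omega

-- A's greedy loop counts exactly the prefix sums that stay within budget
lemma loop_eq (l : List Int) : ∀ s n : Int,
    solveLoop l n (l.length : Int)
      = (l.length : Int) - (((buildPrefix s l).takeWhile (fun p => decide (p ≤ s + n))).length : Int) := by
  induction l with
  | nil => intro s n; simp [solveLoop, buildPrefix]
  | cons f r ih =>
    intro s n
    by_cases hfn : f ≤ n
    · have hsum : s + n = (s + f) + (n - f) := by ring
      simp only [solveLoop, hfn, if_pos, List.length_cons, buildPrefix]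
      rw [show ((r.length + 1 : Nat) : Int) - 1 = (r.length : Int) by omega]
      rw [ih (s + f) (n - f)]
      have hpred : s + f ≤ s + n := by omega
      simp only [List.takeWhile_cons, decide_eq_true_eq, hpred, if_pos, List.length_cons]
      rw [hsum]
      push_cast; ring
    · have hpred : ¬ (s + f ≤ s + n) := by omega
      simp only [solveLoop, hfn, List.length_cons, buildPrefix, List.takeWhile_cons,
        decide_eq_true_eq, hpred, if_false]
      simp
  
-- all counter values (hence all sorted frequencies) are ≥ 1
lemma freq_pos (items : List Int) :
    ∀ f ∈ PySem.List.sorted (PySem.Dict.counter items).values (fun x => x), 1 ≤ f := by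
  intro f hf
  rw [PySem.List.mem_sorted] at hf
  simp only [PySem.Dict.values, PySem.Dict.items_counter, List.map_map, List.mem_map] at hf
  obtain ⟨k, hk, rfl⟩ := hf
  have hkmem : k ∈ items := (PySem.Set.mem_ofList items k).mp hk
  have : 0 < items.count k := List.count_pos_iff.mpr hkmem
  simp only [Function.comp]
  omega

lemma freq_length (items : List Int) :
    (PySem.List.sorted (PySem.Dict.counter items).values (fun x => x)).length
      = (PySem.Dict.counter items).size := by
  simp [PySem.List.length_sorted, PySem.Dict.values, PySem.Dict.size]

-- ===== VERDICT (by name: the statement is the Claim_ definition above) =====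
theorem solve_spec : Claim_equal_solve := by
  intro items n _
  unfold Spec_solve solve solve_alt
  set c := PySem.Dict.counter items with hc
  set freq := PySem.List.sorted c.values (fun x => x) with hfreq
  show solveLoop freq n (c.size : Int)
      = (c.size : Int) - ((PySem.List.bisectRight (buildPrefix 0 freq) n : Nat) : Int)
  have hlen : freq.length = c.size := freq_length items
  have hpos : ∀ f ∈ freq, 1 ≤ f := freq_pos items
  have hsize : (c.size : Int) = (freq.length : Int) := by rw [hlen]
  rw [hsize, loop_eq freq 0 n]
  have hzero : (fun p => decide (p ≤ 0 + n)) = (fun p => decide (p ≤ n)) := by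
    funext p; simp
  rw [hzero]
  congr 1
  -- takeWhile length = bisectRight, via the unique characterization
  set a := buildPrefix 0 freq with ha
  have hpw : a.Pairwise (· < ·) := pairwise_buildPrefix freq 0 hpos
  have hpwle : a.Pairwise (· ≤ ·) := hpw.imp le_of_lt
  obtain ⟨hk1, hk2, hk3⟩ := PySem.List.bisectRight_spec a n hpwle
  have hlb : (buildPrefix 0 freq).length = freq.length := length_buildPrefix freq 0
  have := char_unique a n ((a.takeWhile (fun p => decide (p ≤ n))).length)
      (PySem.List.bisectRight a n)
      ((List.takeWhile_sublist _).length_le)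
      (takeWhile_getElem_le a n)
      (takeWhile_getElem_gt a n hpw)
      hk1 hk2 hk3
  rw [ha] at this
  rw [this]
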